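-- pv_equiv track=rewrite | github.com/Oelshehawi/Parabix | UCD-scripts/casefold.py | caseFoldRangeMap
-- ===== SOURCE A (Python) =====
-- def caseFoldRangeMap(casemap):
--    foldable = sorted(casemap.keys())
--    entries = []
--    cp = foldable[0]
--    open_entries = [(cp, f - cp) for f in casemap[cp]]
--    last_cp = cp
--    for cp in foldable[1:]:
--       if cp != last_cp + 1:
--          # Close the pending range entries
--          for (cp0, offset) in open_entries:
--             entries.append((cp0, last_cp, offset))
--          open_entries = [(cp, f - cp) for f in casemap[cp]]
--       else:
--          new_open = []
--          projected = []
--          for (cp0, offset) in open_entries: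
--             even_odd_offset_group = int(abs(cp - cp0)/ abs(offset)) & 1
--             if even_odd_offset_group == 0:
--                projected_foldcp = cp + offset
--             else: projected_foldcp = cp - offset
--             if not projected_foldcp in casemap[cp]:
--                entries.append((cp0, last_cp, offset))
--             else:
--                new_open.append((cp0, offset))
--                projected.append(projected_foldcp)
--          open_entries = new_open
--          for f in casemap[cp]:
--             if not f in projected:
--                open_entries.append((cp, f-cp))
--       last_cp = cp
--    # Close the final entries.
--    for (cp0, offset) in open_entries:
--       entries.append((cp0, last_cp, offset))
--    return entries
-- ===== SOURCE B (Python) =====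
-- # B: two-phase decomposition -- first split the sorted codepoints into maximal
-- # consecutive runs, then fold each run independently (no last_cp/boundary branch
-- # inside the main loop); entries come out in the same order as A.
--
-- def _foldRun(run, casemap):
--     first = run[0]
--     entries = []
--     opens = [(first, f - first) for f in casemap[first]]
--     for cp in run[1:]:
--         vs = casemap[cp]
--         kept, projected = [], []
--         for (c0, off) in opens:
--             p = cp + off if (((cp - c0) // abs(off)) & 1) == 0 else cp - off
--             if p in vs:
--                 kept.append((c0, off))
--                 projected.append(p)
--             else:
--                 entries.append((c0, cp - 1, off))
--         opens = kept + [(cp, f - cp) for f in vs if f not in projected]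
--     for (c0, off) in opens:
--         entries.append((c0, run[-1], off))
--     return entries
--
-- def caseFoldRangeMap(casemap):
--     keys = sorted(casemap)
--     runs, cur = [], []
--     for k in keys:
--         if cur and k == cur[-1] + 1:
--             cur.append(k)
--         else:
--             if cur:
--                 runs.append(cur)
--             cur = [k]
--     if cur:
--         runs.append(cur)
--     out = []
--     for run in runs:
--         out.extend(_foldRun(run, casemap))
--     return out
-- ===== Notes on version B (the rewrite author's own statement) =====
-- stated objective: alternative
-- what changed: A is a single stateful scan over the sorted codepoints with a run-boundary branch and last_cp bookkeeping; B first groups the sorted codepoints into maximal consecutive runs and then folds each run independently, concatenating the per-run entry lists.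
-- outside the precondition, e.g. on caseFoldRangeMap({}): A raises IndexError, B returns []
import Mathlib
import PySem

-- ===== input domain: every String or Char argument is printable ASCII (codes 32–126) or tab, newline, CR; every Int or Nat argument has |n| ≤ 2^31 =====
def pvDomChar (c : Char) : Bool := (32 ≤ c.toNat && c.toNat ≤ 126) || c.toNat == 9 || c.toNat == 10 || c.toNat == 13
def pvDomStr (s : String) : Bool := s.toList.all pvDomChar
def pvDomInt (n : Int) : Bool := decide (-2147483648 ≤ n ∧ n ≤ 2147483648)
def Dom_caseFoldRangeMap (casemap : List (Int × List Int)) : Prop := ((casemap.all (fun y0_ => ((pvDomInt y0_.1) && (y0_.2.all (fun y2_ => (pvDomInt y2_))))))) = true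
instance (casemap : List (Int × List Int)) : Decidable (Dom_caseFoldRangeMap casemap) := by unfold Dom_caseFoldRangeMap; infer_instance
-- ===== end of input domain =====

-- B re-decomposes A's single stateful scan into run-splitting + an independent fold per
-- consecutive run (objective: alternative decomposition, same cost); return values proved equal on Pre_.

-- ===== PORT A =====
-- inner loop over open_entries; 'int(abs(cp-cp0)/abs(offset)) & 1' is float truncating
-- division in Python: exact as truncdiv on Dom (|values| ≤ 2^31, so |a|,|b| < 2^53)
def aInnerStep (d : PySem.Dict Int (List Int)) (last cp : Int)
    (acc : List (Int × Int × Int) × List (Int × Int) × List Int) (p : Int × Int) :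
    List (Int × Int × Int) × List (Int × Int) × List Int :=
  let g := PySem.Int.band (PySem.Int.truncdiv ((cp - p.1).natAbs : Int) ((p.2.natAbs : Int))) 1
  let proj := if g = 0 then cp + p.2 else cp - p.2
  if proj ∉ d.getD cp [] then (acc.1 ++ [(p.1, last, p.2)], acc.2.1, acc.2.2)
  else (acc.1, acc.2.1 ++ [p], acc.2.2 ++ [proj])

def aStep (d : PySem.Dict Int (List Int))
    (st : List (Int × Int × Int) × List (Int × Int) × Int) (cp : Int) :
    List (Int × Int × Int) × List (Int × Int) × Int :=
  if cp ≠ st.2.2 + 1 then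
    (st.1 ++ st.2.1.map (fun p => (p.1, st.2.2, p.2)),
     (d.getD cp []).map (fun f => (cp, f - cp)), cp)
  else
    let inner := st.2.1.foldl (aInnerStep d st.2.2 cp) (st.1, [], [])
    let opens := (d.getD cp []).foldl
      (fun acc f => if f ∉ inner.2.2 then acc ++ [(cp, f - cp)] else acc) inner.2.1
    (inner.1, opens, cp)

def caseFoldRangeMap (casemap : List (Int × List Int)) : List (Int × Int × Int) :=
  let d := PySem.Dict.ofList casemap
  let foldable := PySem.List.sorted d.keys (fun x => x) false
  let cp := PySem.List.pyGetD foldable 0 0   -- foldable[0]; Pre_ excludes the empty map (IndexError)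
  let st := (foldable.drop 1).foldl (aStep d)   -- foldable[1:]
    ([], (d.getD cp []).map (fun f => (cp, f - cp)), cp)
  st.1 ++ st.2.1.map (fun p => (p.1, st.2.2, p.2))

-- ===== PORT B =====
def bInnerStep (vs : List Int) (cp : Int)
    (acc : List (Int × Int) × List Int × List (Int × Int × Int)) (p : Int × Int) :
    List (Int × Int) × List Int × List (Int × Int × Int) :=
  let proj := if PySem.Int.band (PySem.Int.floordiv (cp - p.1) (p.2.natAbs : Int)) 1 = 0
              then cp + p.2 else cp - p.2
  if proj ∈ vs then (acc.1 ++ [p], acc.2.1 ++ [proj], acc.2.2)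
  else (acc.1, acc.2.1, acc.2.2 ++ [(p.1, cp - 1, p.2)])

-- body of B's per-run loop at one codepoint: (entries emitted here, new opens)
def bStepEmit (d : PySem.Dict Int (List Int)) (cp : Int) (opens : List (Int × Int)) :
    List (Int × Int × Int) × List (Int × Int) :=
  let vs := d.getD cp []
  let inner := opens.foldl (bInnerStep vs cp) ([], [], [])
  (inner.2.2, inner.1 ++ (vs.filter (fun f => f ∉ inner.2.1)).map (fun f => (cp, f - cp)))

def bFoldRun (d : PySem.Dict Int (List Int)) (run : List Int) : List (Int × Int × Int) :=
  match run with
  | [] => []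
  | first :: rest =>
    let st := rest.foldl (fun st cp =>
        let r := bStepEmit d cp st.2
        (st.1 ++ r.1, r.2))
      (([] : List (Int × Int × Int)), (d.getD first []).map (fun f => (first, f - first)))
    st.1 ++ st.2.map (fun p => (p.1, rest.getLastD first, p.2))

-- runs-builder loop: group sorted keys into maximal consecutive runs
def bRunStep (st : List (List Int) × List Int) (k : Int) : List (List Int) × List Int :=
  match st.2.getLast? with
  | some l => if k = l + 1 then (st.1, st.2 ++ [k]) else (st.1 ++ [st.2], [k])
  | none => (st.1, [k])

def caseFoldRangeMap_alt (casemap : List (Int × List Int)) : List (Int × Int × Int) :=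
  let d := PySem.Dict.ofList casemap
  let keys := PySem.List.sorted d.keys (fun x => x) false
  let st := keys.foldl bRunStep ([], [])
  let runs := if st.2 = [] then st.1 else st.1 ++ [st.2]
  runs.flatMap (bFoldRun d)

-- ===== PRECONDITION & SPEC =====
-- Pre_ excludes exactly the inputs where Python A raises: the empty map (IndexError on
-- foldable[0]) and maps with a self-folding codepoint k (k ∈ casemap[k]) whose successor
-- k+1 is also a key (ZeroDivisionError from abs(offset) = 0).
def Pre_caseFoldRangeMap (casemap : List (Int × List Int)) : Prop :=
  casemap ≠ [] ∧
  ∀ k ∈ (PySem.Dict.ofList casemap).keys,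
    ¬(k ∈ (PySem.Dict.ofList casemap).getD k [] ∧ (k + 1) ∈ (PySem.Dict.ofList casemap).keys)
instance (casemap : List (Int × List Int)) : Decidable (Pre_caseFoldRangeMap casemap) := by
  unfold Pre_caseFoldRangeMap; infer_instance

def pvWitness_caseFoldRangeMap : (List (Int × List Int)) := [(65, [97]), (66, [98])]

def Spec_caseFoldRangeMap (casemap : List (Int × List Int)) (out : List (Int × Int × Int)) : Prop := out = caseFoldRangeMap_alt casemap
instance (casemap : List (Int × List Int)) (out : List (Int × Int × Int)) : Decidable (Spec_caseFoldRangeMap casemap out) := by unfold Spec_caseFoldRangeMap; infer_instance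

-- ===== CLAIM (what is proved, stated in full; the proofs are below) =====
def Claim_equal_caseFoldRangeMap : Prop := ∀ (casemap : List (Int × List Int)), Dom_caseFoldRangeMap casemap → Pre_caseFoldRangeMap casemap → Spec_caseFoldRangeMap casemap (caseFoldRangeMap casemap)

-- ===== LEMMAS AND PROOFS =====

def initOpens (d : PySem.Dict Int (List Int)) (cp : Int) : List (Int × Int) :=
  (d.getD cp []).map (fun f => (cp, f - cp))

-- common reference recursion: remaining keys, last processed key, open entries
def spec (d : PySem.Dict Int (List Int)) : List Int → Int → List (Int × Int) → List (Int × Int × Int)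
  | [], last, opens => opens.map (fun p => (p.1, last, p.2))
  | cp :: tl, last, opens =>
    if cp = last + 1 then
      (bStepEmit d cp opens).1 ++ spec d tl cp (bStepEmit d cp opens).2
    else
      opens.map (fun p => (p.1, last, p.2)) ++ spec d tl cp (initOpens d cp)

-- int(a/b) agrees with a//b on naturals (incl. b = 0, where both ports yield 0)
theorem trunc_eq_floor (a b : Nat) :
    PySem.Int.truncdiv (a : Int) (b : Int) = PySem.Int.floordiv (a : Int) (b : Int) := by
  simp [PySem.Int.truncdiv, PySem.Int.floordiv, Int.fdiv_eq_ediv]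

theorem kept_sub (vs : List Int) (cp : Int) :
    ∀ (opens : List (Int × Int)) (kept : List (Int × Int)) (proj : List Int)
      (em : List (Int × Int × Int)),
      ∀ q ∈ (opens.foldl (bInnerStep vs cp) (kept, proj, em)).1, q ∈ kept ∨ q ∈ opens := by
  intro opens
  induction opens with
  | nil => intro kept proj em q hq; exact Or.inl hq
  | cons p rest ih =>
    intro kept proj em q hq
    simp only [List.foldl_cons, bInnerStep] at hq
    by_cases hmem : (if PySem.Int.band (PySem.Int.floordiv (cp - p.1) (p.2.natAbs : Int)) 1 = 0
        then cp + p.2 else cp - p.2) ∈ vs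
    · rw [if_pos hmem] at hq
      rcases ih _ _ _ q hq with h | h
      · rcases List.mem_append.1 h with h | h
        · exact Or.inl h
        · simp at h; subst h; exact Or.inr (List.mem_cons_self ..)
      · exact Or.inr (List.mem_cons_of_mem _ h)
    · rw [if_neg hmem] at hq
      rcases ih _ _ _ q hq with h | h
      · exact Or.inl h
      · exact Or.inr (List.mem_cons_of_mem _ h)

-- A's inner loop over open_entries equals B's (A threads 'entries', B collects them)
theorem inner_eq (d : PySem.Dict Int (List Int)) (cp : Int) :
    ∀ (opens : List (Int × Int)) (e : List (Int × Int × Int)) (kept : List (Int × Int))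
      (proj : List Int) (em : List (Int × Int × Int)),
      (∀ p ∈ opens, p.1 < cp) →
      opens.foldl (aInnerStep d (cp - 1) cp) (e ++ em, kept, proj)
        = (e ++ (opens.foldl (bInnerStep (d.getD cp []) cp) (kept, proj, em)).2.2,
           (opens.foldl (bInnerStep (d.getD cp []) cp) (kept, proj, em)).1,
           (opens.foldl (bInnerStep (d.getD cp []) cp) (kept, proj, em)).2.1) := by
  intro opens
  induction opens with
  | nil => intro e kept proj em _; rfl
  | cons p rest ih =>
    intro e kept proj em hinv
    have hp : p.1 < cp := hinv p (List.mem_cons_self ..)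
    have hg : PySem.Int.truncdiv ((cp - p.1).natAbs : Int) ((p.2.natAbs : Int))
        = PySem.Int.floordiv (cp - p.1) (p.2.natAbs : Int) := by
      rw [trunc_eq_floor]
      congr 1
      omega
    simp only [List.foldl_cons, aInnerStep, bInnerStep, hg]
    by_cases hmem : (if PySem.Int.band (PySem.Int.floordiv (cp - p.1) (p.2.natAbs : Int)) 1 = 0
        then cp + p.2 else cp - p.2) ∈ d.getD cp []
    · simp only [hmem, if_pos, not_true]
      exact ih e (kept ++ [p]) _ em (fun q hq => hinv q (List.mem_cons_of_mem _ hq))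
    · simp only [hmem, not_false_iff, ite_true, ite_false]
      rw [show e ++ em ++ [(p.1, cp - 1, p.2)] = e ++ (em ++ [(p.1, cp - 1, p.2)]) by simp]
      exact ih e kept proj _ (fun q hq => hinv q (List.mem_cons_of_mem _ hq))

theorem foldl_filter_opens (vs : List Int) (proj : List Int) (cp : Int) (kept : List (Int × Int)) :
    vs.foldl (fun acc f => if f ∉ proj then acc ++ [(cp, f - cp)] else acc) kept
      = kept ++ (vs.filter (fun f => f ∉ proj)).map (fun f => (cp, f - cp)) := by
  have h : (fun (acc : List (Int × Int)) f => if f ∉ proj then acc ++ [(cp, f - cp)] else acc)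
      = (fun acc f => if (fun g => decide (g ∉ proj)) f then acc ++ [(cp, f - cp)] else acc) := by
    funext acc f; simp
  rw [h, PySem.List.foldl_append_if]

-- A's whole scan, from any state whose open entries were opened at or before 'last',
-- computes 'spec'
theorem aSide (d : PySem.Dict Int (List Int)) :
    ∀ (keys : List Int) (e : List (Int × Int × Int)) (opens : List (Int × Int)) (last : Int),
      (∀ p ∈ opens, p.1 ≤ last) →
      (keys.foldl (aStep d) (e, opens, last)).1
        ++ (keys.foldl (aStep d) (e, opens, last)).2.1.map
             (fun p => (p.1, (keys.foldl (aStep d) (e, opens, last)).2.2, p.2))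
        = e ++ spec d keys last opens := by
  intro keys
  induction keys with
  | nil => intro e opens last _; simp [spec]
  | cons cp tl ih =>
    intro e opens last hinv
    simp only [List.foldl_cons]
    by_cases hb : cp = last + 1
    · have hlast : last = cp - 1 := by omega
      subst hlast
      have hfold := inner_eq d cp opens e [] [] [] (fun p hp => by have := hinv p hp; omega)
      simp only [List.append_nil] at hfold
      have hstep : aStep d (e, opens, cp - 1) cp
          = (e ++ (bStepEmit d cp opens).1, (bStepEmit d cp opens).2, cp) := by
        simp only [aStep]
        rw [if_neg (not_not_intro hb)]
        rw [show ((e, opens, cp - 1).1, ([] : List (Int × Int)), ([] : List Int)) = (e, ([] : List (Int × Int)), ([] : List Int)) from rfl]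
        rw [hfold, foldl_filter_opens]
        simp only [bStepEmit]
      rw [hstep]
      have hinv2 : ∀ q ∈ (bStepEmit d cp opens).2, q.1 ≤ cp := by
        intro q hq
        simp only [bStepEmit] at hq
        rcases List.mem_append.1 hq with h | h
        · rcases kept_sub (d.getD cp []) cp opens [] [] [] q h with h2 | h2
          · simp at h2
          · have := hinv q h2; omega
        · rcases List.mem_map.1 h with ⟨f, _, rfl⟩; simp
      rw [ih _ _ _ hinv2]
      simp only [spec, if_pos hb, List.append_assoc]
    · have hstep : aStep d (e, opens, last) cp
          = (e ++ opens.map (fun p => (p.1, last, p.2)),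
             (d.getD cp []).map (fun f => (cp, f - cp)), cp) := by
        simp only [aStep]
        rw [if_pos hb]
      rw [hstep]
      have hinv2 : ∀ q ∈ (d.getD cp []).map (fun f => (cp, f - cp)), q.1 ≤ cp := by
        intro q hq; rcases List.mem_map.1 hq with ⟨f, _, rfl⟩; simp
      rw [ih _ _ _ hinv2]
      simp only [spec, if_neg hb, initOpens, List.append_assoc]

-- B's runs-builder + per-run folds, from any partially built run, compute 'spec'
theorem bSide (d : PySem.Dict Int (List Int)) :
    ∀ (keys : List Int) (rs : List (List Int)) (first : Int) (mid : List Int),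
      (let st := keys.foldl bRunStep (rs, first :: mid);
       (if st.2 = [] then st.1 else st.1 ++ [st.2]).flatMap (bFoldRun d))
        = rs.flatMap (bFoldRun d)
          ++ (mid.foldl (fun st cp => let r := bStepEmit d cp st.2; (st.1 ++ r.1, r.2))
               (([] : List (Int × Int × Int)), initOpens d first)).1
          ++ spec d keys (mid.getLastD first)
              (mid.foldl (fun st cp => let r := bStepEmit d cp st.2; (st.1 ++ r.1, r.2))
               (([] : List (Int × Int × Int)), initOpens d first)).2 := by
  intro keys
  induction keys with
  | nil =>
    intro rs first mid
    simp only [List.foldl_nil, List.cons_ne_nil, ite_false, List.flatMap_append,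
      List.flatMap_cons, List.flatMap_nil, List.append_nil, spec, bFoldRun, initOpens,
      List.append_assoc]
  | cons k tl ih =>
    intro rs first mid
    simp only [List.foldl_cons] at *
    have hlast : (first :: mid).getLast? = some (mid.getLastD first) := by
      rw [List.getLastD_eq_getLast?]; exact List.getLast?_cons
    by_cases hk : k = mid.getLastD first + 1
    · have hstep : bRunStep (rs, first :: mid) k = (rs, first :: (mid ++ [k])) := by
        simp only [bRunStep, hlast, if_pos hk, List.cons_append]
      rw [hstep, ih rs first (mid ++ [k])]
      rw [List.foldl_append]
      simp only [List.foldl_cons, List.foldl_nil, List.getLastD_concat, spec, if_pos hk,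
        List.append_assoc]
    · have hstep : bRunStep (rs, first :: mid) k = (rs ++ [first :: mid], [k]) := by
        simp only [bRunStep, hlast, if_neg hk]
      rw [hstep, ih (rs ++ [first :: mid]) k []]
      simp only [List.foldl_nil, List.getLastD_nil, List.flatMap_append, List.flatMap_cons,
        List.flatMap_nil, List.append_nil, bFoldRun, spec, if_neg hk, initOpens,
        List.append_assoc]

theorem keys_update_ne_nil (l : List (Int × List Int)) (d : PySem.Dict Int (List Int))
    (h : d.keys ≠ []) : (d.update l).keys ≠ [] := by
  induction l generalizing d with
  | nil => exact h
  | cons p t ih =>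
    rw [show d.update (p :: t) = (d.insert p.1 p.2).update t from rfl]
    apply ih
    intro hnil
    have := PySem.Dict.mem_keys_insert (d := d) (k := p.1) (v := p.2) (k' := p.1)
    simp [hnil] at this

theorem sorted_keys_ne_nil (casemap : List (Int × List Int)) (h : casemap ≠ []) :
    PySem.List.sorted (PySem.Dict.ofList casemap).keys (fun x => x) false ≠ [] := by
  have hk : (PySem.Dict.ofList casemap).keys ≠ [] := by
    cases casemap with
    | nil => exact absurd rfl h
    | cons p l =>
      rw [show PySem.Dict.ofList (p :: l) = (PySem.Dict.empty.insert p.1 p.2).update l from rfl]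
      apply keys_update_ne_nil
      intro hnil
      have := PySem.Dict.mem_keys_insert (d := PySem.Dict.empty (κ := Int) (ν := List Int))
        (k := p.1) (v := p.2) (k' := p.1)
      simp [hnil] at this
  intro hs
  apply hk
  have := PySem.List.length_sorted (xs := (PySem.Dict.ofList casemap).keys)
    (key := fun (x : Int) => x) (rev := false)
  rw [hs] at this
  exact List.length_eq_zero_iff.1 this.symm

-- ===== VERDICT (by name: the statement is the Claim_ definition above) =====
theorem caseFoldRangeMap_spec : Claim_equal_caseFoldRangeMap := by
  unfold Claim_equal_caseFoldRangeMap
  intro casemap _ hPre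
  unfold Spec_caseFoldRangeMap
  obtain ⟨k, tl, hk⟩ := List.exists_cons_of_ne_nil (sorted_keys_ne_nil casemap hPre.1)
  simp only [caseFoldRangeMap, caseFoldRangeMap_alt]
  simp only [hk]
  have hA := aSide (PySem.Dict.ofList casemap) tl []
    (((PySem.Dict.ofList casemap).getD k []).map (fun f => (k, f - k))) k
    (by intro p hp; rcases List.mem_map.1 hp with ⟨f, _, rfl⟩; simp)
  have hB := bSide (PySem.Dict.ofList casemap) tl [] k []
  simp only [List.foldl_nil, List.getLastD_nil, List.flatMap_nil, List.nil_append,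
    initOpens] at hB
  simp only [List.nil_append] at hA
  simp only [List.foldl_cons, List.drop_succ_cons, List.drop_zero]
  rw [show PySem.List.pyGetD (k :: tl) 0 0 = k by simp [pysem]]
  rw [show bRunStep ([], []) k = ([], [k]) from rfl]
  rw [hA, hB]
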